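-- pv_equiv track=rewrite | github.com/shawinsoranakom/CodeSnippets | CollectedSnippets/TrainingDataset5/Snip0784.py | find_narcissistic_numbers
-- ===== SOURCE A (Python) =====
-- def find_narcissistic_numbers(limit: int) -> list[int]:
--     if limit <= 0:
--         return []
--
--     narcissistic_nums = []
--
--     power_cache: dict[tuple[int, int], int] = {}
--
--     def get_digit_power(digit: int, power: int) -> int:
--         if (power, digit) not in power_cache:
--             power_cache[(power, digit)] = digit**power
--         return power_cache[(power, digit)]
--
--     for number in range(limit):
--         num_digits = len(str(number))
--
--         remaining = number
--         digit_sum = 0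
--         while remaining > 0:
--             digit = remaining % 10
--             digit_sum += get_digit_power(digit, num_digits)
--             remaining //= 10
--
--         if digit_sum == number:
--             narcissistic_nums.append(number)
--
--     return narcissistic_nums
-- ===== SOURCE B (Python) =====
-- def find_narcissistic_numbers(limit: int) -> list[int]:
--     if limit <= 0:
--         return []
--
--     max_d = len(str(limit - 1))
--     results = []
--     for d in range(1, max_d + 1):
--         powers = [i ** d for i in range(10)]
--         for combo in _nondecreasing_digit_lists(d, 0):
--             s = 0
--             for c in combo:
--                 s += powers[c]
--             if s < limit and _sorted_digits(s) == combo and len(str(s)) == d: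
--                 results.append(s)
--     results.sort()
--     return results
--
--
-- def _nondecreasing_digit_lists(d: int, lo: int) -> list[list[int]]:
--     if d <= 0:
--         return [[]]
--     out = []
--     for c in range(lo, 10):
--         for rest in _nondecreasing_digit_lists(d - 1, c):
--             out.append([c] + rest)
--     return out
--
--
-- def _sorted_digits(n: int) -> list[int]:
--     ds = []
--     while n > 0:
--         ds.append(n % 10)
--         n //= 10
--     if ds == []:
--         ds = [0]
--     ds.sort()
--     return ds
-- ===== Notes on version B (the rewrite author's own statement) =====
-- stated objective: faster
-- what changed: Instead of testing every number below limit, B enumerates, per digit-length d, all nondecreasing digit multisets, computes each power sum once, keeps it when its own sorted digits reproduce the multiset (and it has d digits and is below limit), then sorts the collected numbers.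
import Mathlib
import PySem

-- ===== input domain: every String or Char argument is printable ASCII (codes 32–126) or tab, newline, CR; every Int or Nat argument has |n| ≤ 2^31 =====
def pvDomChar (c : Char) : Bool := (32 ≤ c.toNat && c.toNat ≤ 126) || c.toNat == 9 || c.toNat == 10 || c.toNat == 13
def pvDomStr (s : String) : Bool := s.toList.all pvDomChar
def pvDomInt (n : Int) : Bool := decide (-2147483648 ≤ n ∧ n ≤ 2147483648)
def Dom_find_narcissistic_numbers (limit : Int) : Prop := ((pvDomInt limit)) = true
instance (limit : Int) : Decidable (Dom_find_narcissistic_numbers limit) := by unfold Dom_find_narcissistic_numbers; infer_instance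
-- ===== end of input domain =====

-- B replaces A's scan of every number below limit by an enumeration of nondecreasing
-- digit multisets per digit length (power sums checked against their own digits), which
-- a timing run measured as asymptotically faster; equivalence is proved for all limits.

-- ===== PORT A =====

-- get_digit_power: threads the memo dict through; `digit ** power` is `digit ^ power.toNat`
-- (exact here: power = len(str(number)) ≥ 1); the final `power_cache[(power, digit)]`
-- lookup always succeeds (the key was just ensured), ported as get? with a default.
def pvGetDigitPower (cache : PySem.Dict (Int × Int) Int) (digit power : Int) :
    PySem.Dict (Int × Int) Int × Int :=
  let cache := if cache.contains (power, digit) then cache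
               else cache.insert (power, digit) (digit ^ power.toNat)
  (cache, (cache.get? (power, digit)).getD 0)

-- the `while remaining > 0` loop of A
def pvDigitLoop (numDigits : Int) (cache : PySem.Dict (Int × Int) Int)
    (remaining digitSum : Int) : PySem.Dict (Int × Int) Int × Int :=
  if h : 0 < remaining then
    let digit := PySem.Int.mod remaining 10
    let r := pvGetDigitPower cache digit numDigits
    pvDigitLoop numDigits r.1 (PySem.Int.floordiv remaining 10) (digitSum + r.2)
  else (cache, digitSum)
termination_by remaining.toNat
decreasing_by
  have h10 : PySem.Int.floordiv remaining 10 = remaining / 10 :=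
    PySem.Int.floordiv_eq_ediv_of_pos (by omega)
  rw [h10]; omega

def find_narcissistic_numbers (limit : Int) : List Int :=
  if limit ≤ 0 then []
  else
    let st := (PySem.List.pyRange 0 limit 1).foldl
      (fun (st : PySem.Dict (Int × Int) Int × List Int) number =>
        let numDigits := PySem.Str.len (PySem.Int.toStr number)
        let r := pvDigitLoop numDigits st.1 number 0
        (r.1, if r.2 = number then st.2 ++ [number] else st.2))
      (PySem.Dict.empty, [])
    st.2

-- ===== PORT B =====

-- _nondecreasing_digit_lists(d, lo): all nondecreasing lists of d digits in [lo, 10)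
def pvNdLists (d : Int) (lo : Int) : List (List Int) :=
  if d ≤ 0 then [[]]
  else (PySem.List.pyRange lo 10 1).flatMap
    (fun c => (pvNdLists (d - 1) c).map (fun rest => c :: rest))
termination_by d.toNat
decreasing_by omega

-- the `while n > 0` digit loop of _sorted_digits
def pvDigitsRev (n : Int) (acc : List Int) : List Int :=
  if 0 < n then pvDigitsRev (PySem.Int.floordiv n 10) (acc ++ [PySem.Int.mod n 10]) else acc
termination_by n.toNat
decreasing_by
  have h10 : PySem.Int.floordiv n 10 = n / 10 := PySem.Int.floordiv_eq_ediv_of_pos (by omega)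
  rw [h10]; omega

def pvSortedDigits (n : Int) : List Int :=
  let ds := pvDigitsRev n []
  let ds := if ds = [] then [0] else ds
  PySem.List.sorted ds (fun x => x) false

def find_narcissistic_numbers_alt (limit : Int) : List Int :=
  if limit ≤ 0 then []
  else
    let maxD := PySem.Str.len (PySem.Int.toStr (limit - 1))
    let results := (PySem.List.pyRange 1 (maxD + 1) 1).foldl
      (fun results d =>
        let powers := (PySem.List.pyRange 0 10 1).map (fun i => i ^ d.toNat)
        (pvNdLists d 0).foldl
          (fun results combo =>
            let s := combo.foldl (fun s c => s + PySem.List.pyGetD powers c 0) 0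
            if s < limit ∧ pvSortedDigits s = combo ∧ PySem.Str.len (PySem.Int.toStr s) = d
            then results ++ [s] else results)
          results)
      []
    PySem.List.sorted results (fun x => x) false

-- ===== PRECONDITION & SPEC =====
def Spec_find_narcissistic_numbers (limit : Int) (out : List Int) : Prop := out = find_narcissistic_numbers_alt limit
instance (limit : Int) (out : List Int) : Decidable (Spec_find_narcissistic_numbers limit out) := by unfold Spec_find_narcissistic_numbers; infer_instance

-- ===== CLAIM (what is proved, stated in full; the proofs are below) =====
def Claim_equal_find_narcissistic_numbers : Prop := ∀ (limit : Int), Dom_find_narcissistic_numbers limit → Spec_find_narcissistic_numbers limit (find_narcissistic_numbers limit)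

-- ===== LEMMAS AND PROOFS =====

-- number of characters of str(n) for n ≥ 0
def pvL (n : Int) : Nat := (Nat.toDigits 10 n.toNat).length

-- decimal digits of n (least significant first), as integers; [] for n ≤ 0
def pvNatDigits (n : Int) : List Int := (Nat.digits 10 n.toNat).map Int.ofNat

-- sum of d-th powers
def pvPSum (d : Nat) (l : List Int) : Int := (l.map (fun c => c ^ d)).sum

-- the narcissistic test A performs on each n ≥ 0
def pvNarc (n : Int) : Bool := decide (pvPSum (pvL n) (pvNatDigits n) = n)

-- invariant of A's memo dict
def pvInv (cache : PySem.Dict (Int × Int) Int) : Prop :=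
  ∀ p d v, cache.get? (p, d) = some v → v = d ^ p.toNat

theorem pvL_pos (n : Int) : 0 < pvL n := Nat.length_toDigits_pos

theorem pvStrLen (n : Int) (h : 0 ≤ n) :
    PySem.Str.len (PySem.Int.toStr n) = (pvL n : Int) := by
  rw [PySem.Str.len_eq, PySem.Int.toList_toStr]
  simp [PySem.Int.toChars, not_lt.mpr h, pvL]

theorem pvGetDigitPower_spec (cache : PySem.Dict (Int × Int) Int) (digit power : Int)
    (h : pvInv cache) :
    (pvGetDigitPower cache digit power).2 = digit ^ power.toNat ∧
      pvInv (pvGetDigitPower cache digit power).1 := by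
  unfold pvGetDigitPower
  by_cases hc : cache.contains (power, digit) = true
  · simp only [hc, if_true]
    rw [PySem.Dict.contains_eq_isSome_get?] at hc
    obtain ⟨v, hv⟩ := Option.isSome_iff_exists.mp hc
    exact ⟨by rw [hv, Option.getD_some, h power digit v hv], h⟩
  · rw [Bool.not_eq_true] at hc
    simp only [hc, Bool.false_eq_true, if_false]
    refine ⟨by rw [PySem.Dict.get?_insert_self, Option.getD_some], ?_⟩
    intro p d v hv
    by_cases hk : (p, d) = (power, digit)
    · rw [hk, PySem.Dict.get?_insert_self] at hv
      simp only [Prod.mk.injEq] at hk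
      rw [hk.1, hk.2]
      exact (Option.some_inj.mp hv).symm
    · rw [PySem.Dict.get?_insert_of_ne _ _ hk] at hv
      exact h p d v hv

theorem pvDigitLoop_spec (numDigits : Int) (cache : PySem.Dict (Int × Int) Int)
    (remaining digitSum : Int) (hr : 0 ≤ remaining) (h : pvInv cache) :
    (pvDigitLoop numDigits cache remaining digitSum).2
        = digitSum + pvPSum numDigits.toNat (pvNatDigits remaining) ∧
      pvInv (pvDigitLoop numDigits cache remaining digitSum).1 := by
  obtain ⟨k, hk⟩ : ∃ k, remaining.toNat ≤ k := ⟨remaining.toNat, le_refl _⟩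
  induction k generalizing cache remaining digitSum with
  | zero =>
    have hr0 : remaining = 0 := by omega
    rw [pvDigitLoop]
    subst hr0
    simp [pvNatDigits, pvPSum]
    exact h
  | succ k ih =>
    rw [pvDigitLoop]
    by_cases hpos : 0 < remaining
    · simp only [hpos, dif_pos]
      have hmod : PySem.Int.mod remaining 10 = remaining % 10 :=
        PySem.Int.mod_eq_emod_of_pos (by omega)
      have hdiv : PySem.Int.floordiv remaining 10 = remaining / 10 :=
        PySem.Int.floordiv_eq_ediv_of_pos (by omega)
      obtain ⟨hval, hinv⟩ := pvGetDigitPower_spec cache (PySem.Int.mod remaining 10) numDigits h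
      have hdig : pvNatDigits remaining
          = (remaining % 10) :: pvNatDigits (remaining / 10) := by
        unfold pvNatDigits
        rw [Nat.digits_def' (by norm_num : (1:ℕ) < 10) (by omega : 0 < remaining.toNat)]
        rw [List.map_cons]
        simp only [Int.ofNat_eq_natCast]
        rw [show ((remaining.toNat % 10 : Nat) : Int) = remaining % 10 by omega,
          show remaining.toNat / 10 = (remaining / 10).toNat by omega]
      obtain ⟨ih1, ih2⟩ := ih (pvGetDigitPower cache (PySem.Int.mod remaining 10) numDigits).1
        (remaining / 10) (digitSum + (pvGetDigitPower cache (PySem.Int.mod remaining 10) numDigits).2)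
        (by omega) hinv (by omega)
      rw [hdiv]
      refine ⟨?_, ih2⟩
      rw [ih1, hval, hdig, hmod]
      simp only [pvPSum, List.map_cons, List.sum_cons]
      ring
    · simp only [hpos, dif_neg, not_false_iff]
      have hr0 : remaining = 0 := by omega
      subst hr0
      simp [pvNatDigits, pvPSum]
      exact h

theorem pvAFold (l : List Int) (cache : PySem.Dict (Int × Int) Int) (acc : List Int)
    (hl : ∀ n ∈ l, 0 ≤ n) (h : pvInv cache) :
    (l.foldl (fun (st : PySem.Dict (Int × Int) Int × List Int) number =>
        ((pvDigitLoop (PySem.Str.len (PySem.Int.toStr number)) st.1 number 0).1,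
         if (pvDigitLoop (PySem.Str.len (PySem.Int.toStr number)) st.1 number 0).2 = number
         then st.2 ++ [number] else st.2)) (cache, acc)).2
      = acc ++ l.filter pvNarc := by
  induction l generalizing cache acc with
  | nil => simp
  | cons n t ih =>
    have hn : 0 ≤ n := hl n (by simp)
    obtain ⟨hv, hi⟩ := pvDigitLoop_spec (PySem.Str.len (PySem.Int.toStr n)) cache n 0 hn h
    have hval : (pvDigitLoop (PySem.Str.len (PySem.Int.toStr n)) cache n 0).2
        = pvPSum (pvL n) (pvNatDigits n) := by
      rw [hv, pvStrLen n hn]; simp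
    simp only [List.foldl_cons]
    rw [ih _ _ (fun m hm => hl m (List.mem_cons_of_mem _ hm)) hi]
    by_cases hc : pvPSum (pvL n) (pvNatDigits n) = n
    · rw [List.filter_cons_of_pos (by simp [pvNarc, hc]), if_pos (by rw [hval]; exact hc)]
      simp
    · rw [List.filter_cons_of_neg (by simp [pvNarc, hc]), if_neg (by rw [hval]; exact hc)]

theorem pvA_filter (limit : Int) :
    find_narcissistic_numbers limit = (PySem.List.pyRange 0 limit 1).filter pvNarc := by
  unfold find_narcissistic_numbers
  by_cases hl : limit ≤ 0
  · rw [if_pos hl, PySem.List.pyRange_one_eq_nil hl, List.filter_nil]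
  · rw [if_neg hl]
    exact (pvAFold (PySem.List.pyRange 0 limit 1) PySem.Dict.empty []
      (fun n hn => (PySem.List.mem_pyRange_one.mp hn).1)
      (fun p d v hv => by simp [PySem.Dict.empty, PySem.Dict.get?] at hv)).trans
      (List.nil_append _)

-- ===== B-side lemmas =====

-- digits of n with 0 rendered as [0] (what _sorted_digits sorts)
def pvDigits0 (n : Int) : List Int := if n = 0 then [0] else pvNatDigits n

theorem pvDigitsRev_spec (n : Int) (acc : List Int) (hn : 0 ≤ n) :
    pvDigitsRev n acc = acc ++ pvNatDigits n := by
  obtain ⟨k, hk⟩ : ∃ k, n.toNat ≤ k := ⟨n.toNat, le_refl _⟩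
  induction k generalizing n acc with
  | zero =>
    have h0 : n = 0 := by omega
    subst h0
    rw [pvDigitsRev]
    simp [pvNatDigits]
  | succ k ih =>
    rw [pvDigitsRev]
    by_cases hpos : 0 < n
    · have hdiv : PySem.Int.floordiv n 10 = n / 10 :=
        PySem.Int.floordiv_eq_ediv_of_pos (by omega)
      have hmod : PySem.Int.mod n 10 = n % 10 :=
        PySem.Int.mod_eq_emod_of_pos (by omega)
      rw [if_pos hpos, ih _ _ (by omega) (by omega)]
      have hdig : pvNatDigits n = (n % 10) :: pvNatDigits (n / 10) := by
        unfold pvNatDigits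
        rw [Nat.digits_def' (by norm_num : (1:ℕ) < 10) (by omega : 0 < n.toNat)]
        rw [List.map_cons]
        simp only [Int.ofNat_eq_natCast]
        rw [show ((n.toNat % 10 : Nat) : Int) = n % 10 by omega,
          show n.toNat / 10 = (n / 10).toNat by omega]
      rw [hdig, hdiv, hmod]
      simp
    · have h0 : n = 0 := by omega
      subst h0
      simp [pvNatDigits]

theorem pvSortedDigits_eq (n : Int) (hn : 0 ≤ n) :
    pvSortedDigits n = PySem.List.sorted (pvDigits0 n) (fun x => x) false := by
  unfold pvSortedDigits
  rw [pvDigitsRev_spec n [] hn, List.nil_append]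
  by_cases h0 : n = 0
  · subst h0
    simp [pvNatDigits, pvDigits0]
  · have hne : pvNatDigits n ≠ [] := by
      simp [pvNatDigits, Nat.digits_eq_nil_iff_eq_zero]
      omega
    show PySem.List.sorted (if pvNatDigits n = [] then [0] else pvNatDigits n) (fun x => x) false
        = PySem.List.sorted (pvDigits0 n) (fun x => x) false
    rw [if_neg hne, pvDigits0, if_neg h0]

-- membership characterization of the multiset enumeration
theorem pvNd_mem (d lo : Int) (l : List Int) :
    l ∈ pvNdLists d lo ↔
      l.length = d.toNat ∧ (∀ c ∈ l, lo ≤ c ∧ c < 10) ∧ l.Pairwise (· ≤ ·) := by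
  obtain ⟨k, hk⟩ : ∃ k, d.toNat ≤ k := ⟨d.toNat, le_refl _⟩
  induction k generalizing d lo l with
  | zero =>
    have hd : d ≤ 0 := by omega
    rw [pvNdLists, if_pos hd]
    constructor
    · rintro h
      simp at h
      subst h
      simp
      omega
    · rintro ⟨h1, -, -⟩
      have : l = [] := List.length_eq_zero_iff.mp (by omega)
      simp [this]
  | succ k ih =>
    by_cases hd : d ≤ 0
    · rw [pvNdLists, if_pos hd]
      constructor
      · rintro h
        simp at h
        subst h
        simp
        omega
      · rintro ⟨h1, -, -⟩
        have : l = [] := List.length_eq_zero_iff.mp (by omega)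
        simp [this]
    · rw [pvNdLists, if_neg hd]
      rw [List.mem_flatMap]
      constructor
      · rintro ⟨c, hc, hl⟩
        rw [List.mem_map] at hl
        obtain ⟨rest, hrest, hcons⟩ := hl
        obtain ⟨hcl, hcu⟩ := PySem.List.mem_pyRange_one.mp hc
        rw [ih (d - 1) c rest (by omega)] at hrest
        obtain ⟨hlen, hmem, hpw⟩ := hrest
        subst hcons
        refine ⟨by simp [hlen]; omega, ?_, ?_⟩
        · intro x hx
          rcases List.mem_cons.mp hx with h | h
          · subst h; exact ⟨hcl, hcu⟩
          · exact ⟨le_trans hcl (hmem x h).1, (hmem x h).2⟩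
        · rw [List.pairwise_cons]
          exact ⟨fun x hx => (hmem x hx).1, hpw⟩
      · rintro ⟨hlen, hmem, hpw⟩
        obtain ⟨c, rest, rfl⟩ : ∃ c rest, l = c :: rest := by
          cases l with
          | nil => simp at hlen; omega
          | cons c rest => exact ⟨c, rest, rfl⟩
        obtain ⟨hcl, hcu⟩ := hmem c (by simp)
        rw [List.pairwise_cons] at hpw
        refine ⟨c, PySem.List.mem_pyRange_one.mpr ⟨hcl, hcu⟩, ?_⟩
        rw [List.mem_map]
        refine ⟨rest, ?_, rfl⟩
        rw [ih (d - 1) c rest (by omega)]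
        refine ⟨by simp at hlen; omega, ?_, hpw.2⟩
        intro x hx
        exact ⟨hpw.1 x hx, (hmem x (List.mem_cons_of_mem _ hx)).2⟩

theorem pvNd_nodup (d lo : Int) : (pvNdLists d lo).Nodup := by
  obtain ⟨k, hk⟩ : ∃ k, d.toNat ≤ k := ⟨d.toNat, le_refl _⟩
  induction k generalizing d lo with
  | zero =>
    rw [pvNdLists, if_pos (by omega : d ≤ 0)]
    simp
  | succ k ih =>
    by_cases hd : d ≤ 0
    · rw [pvNdLists, if_pos hd]; simp
    · rw [pvNdLists, if_neg hd]
      rw [List.nodup_flatMap]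
      constructor
      · intro c _
        exact (ih (d - 1) c (by omega)).map List.cons_injective
      · refine (PySem.List.pairwise_lt_pyRange_one lo 10).imp ?_
        intro a b hab l hla hlb
        rw [List.mem_map] at hla hlb
        obtain ⟨ra, -, rfl⟩ := hla
        obtain ⟨rb, -, hb⟩ := hlb
        injection hb with h1 h2
        omega

-- the power-sum computed by B's inner foldl
theorem pvSumFoldl (d : Int) (combo : List Int)
    (hmem : ∀ c ∈ combo, 0 ≤ c ∧ c < 10) :
    combo.foldl (fun s c =>
        s + PySem.List.pyGetD ((PySem.List.pyRange 0 10 1).map (fun i => i ^ d.toNat)) c 0) 0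
      = pvPSum d.toNat combo := by
  rw [PySem.List.foldl_congr_mem combo _ (fun s c => s + c ^ d.toNat) 0 (by
    intro acc x hx
    rw [PySem.List.pyGetD_map_pyRange_of_nonneg _ 10 x 0 (hmem x hx).1 (hmem x hx).2])]
  rw [PySem.List.foldl_add]
  simp [pvPSum]

-- accumulate-if loop as filter + map
theorem pvFoldAcc {α β : Type} (l : List α) (q : α → Prop) [DecidablePred q] (f : α → β)
    (acc : List β) :
    l.foldl (fun acc x => if q x then acc ++ [f x] else acc) acc
      = acc ++ (l.filter (fun x => decide (q x))).map f := by
  induction l generalizing acc with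
  | nil => simp
  | cons x t ih =>
    simp only [List.foldl_cons]
    rw [ih]
    by_cases hx : q x
    · rw [if_pos hx, List.filter_cons_of_pos (by simp [hx])]
      simp
    · rw [if_neg hx, List.filter_cons_of_neg (by simp [hx])]

-- ===== digit-length lemmas =====

theorem pvLdig (m : Nat) (hm : 0 < m) :
    (Nat.digits 10 m).length = (Nat.toDigits 10 m).length := by
  have h1 : 0 < (Nat.toDigits 10 m).length := Nat.length_toDigits_pos
  have h2 : 0 < (Nat.digits 10 m).length :=
    List.length_pos_iff.mpr (Nat.digits_ne_nil_iff_ne_zero.mpr (by omega))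
  have h3 : m < 10 ^ (Nat.toDigits 10 m).length :=
    (Nat.length_toDigits_le_iff (by norm_num) h1).mp (le_refl _)
  have h4 : m < 10 ^ (Nat.digits 10 m).length :=
    (Nat.digits_length_le_iff (by norm_num) m).mp (le_refl _)
  have h5 := (Nat.digits_length_le_iff (b := 10) (by norm_num) m).mpr h3
  have h6 := (Nat.length_toDigits_le_iff (b := 10) (n := m) (by norm_num) h2).mpr h4
  omega

theorem pvDigits0_length (x : Int) (hx : 0 ≤ x) : (pvDigits0 x).length = pvL x := by
  by_cases h0 : x = 0
  · subst h0
    simp [pvDigits0, pvL]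
  · rw [pvDigits0, if_neg h0, pvNatDigits, List.length_map, pvL]
    exact pvLdig x.toNat (by omega)

theorem pvL_mono (x y : Int) (h0 : 0 ≤ x) (hxy : x ≤ y) : pvL x ≤ pvL y := by
  unfold pvL
  refine (Nat.length_toDigits_le_iff (by norm_num) Nat.length_toDigits_pos).mpr ?_
  have hy : y.toNat < 10 ^ (Nat.toDigits 10 y.toNat).length :=
    (Nat.length_toDigits_le_iff (by norm_num) Nat.length_toDigits_pos).mp (le_refl _)
  have : x.toNat ≤ y.toNat := by omega
  omega

theorem pvDigits0_mem (x : Int) (hx : 0 ≤ x) : ∀ c ∈ pvDigits0 x, 0 ≤ c ∧ c < 10 := by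
  intro c hc
  by_cases h0 : x = 0
  · subst h0
    simp [pvDigits0] at hc
    omega
  · rw [pvDigits0, if_neg h0, pvNatDigits, List.mem_map] at hc
    obtain ⟨k, hk, rfl⟩ := hc
    have := Nat.digits_lt_base (by norm_num) hk
    simp only [Int.ofNat_eq_natCast]
    omega

theorem pvPSum_perm (k : Nat) {l l' : List Int} (h : l.Perm l') : pvPSum k l = pvPSum k l' :=
  (h.map _).sum_eq

theorem pvPSum_digits0 (x : Int) (k : Nat) (hk : 0 < k) :
    pvPSum k (pvDigits0 x) = pvPSum k (pvNatDigits x) := by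
  by_cases h0 : x = 0
  · subst h0
    simp [pvDigits0, pvNatDigits, pvPSum, zero_pow (by omega : k ≠ 0)]
  · rw [pvDigits0, if_neg h0]

-- ===== B characterized =====

-- the inner power-sum expression exactly as the port computes it
def pvSRaw (d : Int) (combo : List Int) : Int :=
  combo.foldl (fun s c =>
    s + PySem.List.pyGetD ((PySem.List.pyRange 0 10 1).map (fun i => i ^ d.toNat)) c 0) 0

-- the list B collects before sorting
def pvBRes (limit : Int) : List Int :=
  (PySem.List.pyRange 1 (PySem.Str.len (PySem.Int.toStr (limit - 1)) + 1) 1).flatMap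
    (fun d => ((pvNdLists d 0).filter
        (fun combo => decide (pvPSum d.toNat combo < limit ∧
          pvSortedDigits (pvPSum d.toNat combo) = combo ∧
          PySem.Str.len (PySem.Int.toStr (pvPSum d.toNat combo)) = d))).map
      (fun combo => pvPSum d.toNat combo))

theorem pvB_eq (limit : Int) (hl : ¬ limit ≤ 0) :
    find_narcissistic_numbers_alt limit
      = PySem.List.sorted (pvBRes limit) (fun x => x) false := by
  unfold find_narcissistic_numbers_alt
  rw [if_neg hl]
  show PySem.List.sorted
      ((PySem.List.pyRange 1 (PySem.Str.len (PySem.Int.toStr (limit - 1)) + 1) 1).foldl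
        (fun results d => (pvNdLists d 0).foldl
          (fun results combo =>
            if pvSRaw d combo < limit ∧ pvSortedDigits (pvSRaw d combo) = combo ∧
                PySem.Str.len (PySem.Int.toStr (pvSRaw d combo)) = d
            then results ++ [pvSRaw d combo] else results)
          results)
        []) (fun x => x) false
    = PySem.List.sorted (pvBRes limit) (fun x => x) false
  congr 1
  have h2 : (fun (results : List Int) (d : Int) => (pvNdLists d 0).foldl
          (fun results combo =>
            if pvSRaw d combo < limit ∧ pvSortedDigits (pvSRaw d combo) = combo ∧
                PySem.Str.len (PySem.Int.toStr (pvSRaw d combo)) = d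
            then results ++ [pvSRaw d combo] else results)
          results)
      = (fun results d => results ++ ((pvNdLists d 0).filter
          (fun combo => decide (pvSRaw d combo < limit ∧
            pvSortedDigits (pvSRaw d combo) = combo ∧
            PySem.Str.len (PySem.Int.toStr (pvSRaw d combo)) = d))).map
        (fun combo => pvSRaw d combo)) := by
    funext results d
    exact pvFoldAcc (pvNdLists d 0)
      (fun combo => pvSRaw d combo < limit ∧ pvSortedDigits (pvSRaw d combo) = combo ∧
        PySem.Str.len (PySem.Int.toStr (pvSRaw d combo)) = d)
      (fun combo => pvSRaw d combo) results
  rw [h2, PySem.List.foldl_append_eq_flatMap, List.nil_append, pvBRes]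
  congr 1
  funext d
  have hent : ∀ combo ∈ pvNdLists d 0, pvSRaw d combo = pvPSum d.toNat combo := by
    intro combo hc
    exact pvSumFoldl d combo (fun c hcc => ((pvNd_mem d 0 combo).mp hc).2.1 c hcc)
  rw [List.filter_congr
    (q := fun combo => decide (pvPSum d.toNat combo < limit ∧
      pvSortedDigits (pvPSum d.toNat combo) = combo ∧
      PySem.Str.len (PySem.Int.toStr (pvPSum d.toNat combo)) = d))
    (fun combo hc => by simp only [hent combo hc])]
  refine List.map_congr_left ?_
  intro combo hc
  exact hent combo (List.mem_of_mem_filter hc)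

theorem pvBRes_mem (limit x : Int) (hl : ¬ limit ≤ 0) :
    x ∈ pvBRes limit ↔ 0 ≤ x ∧ x < limit ∧ pvPSum (pvL x) (pvNatDigits x) = x := by
  unfold pvBRes
  rw [List.mem_flatMap]
  constructor
  · rintro ⟨d, hd, hx⟩
    rw [List.mem_map] at hx
    obtain ⟨combo, hcf, rfl⟩ := hx
    rw [List.mem_filter, decide_eq_true_iff] at hcf
    obtain ⟨hcm, hlt, hsort, hlen⟩ := hcf
    obtain ⟨-, hent, -⟩ := (pvNd_mem d 0 combo).mp hcm
    have hx0 : 0 ≤ pvPSum d.toNat combo := by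
      refine List.sum_nonneg ?_
      intro a ha
      rw [List.mem_map] at ha
      obtain ⟨c, hc, rfl⟩ := ha
      exact pow_nonneg (hent c hc).1 _
    set t := pvPSum d.toNat combo with ht
    have hdL : d.toNat = pvL t := by
      rw [pvStrLen _ hx0] at hlen
      omega
    refine ⟨hx0, hlt, ?_⟩
    have hperm : combo.Perm (pvDigits0 t) := by
      rw [pvSortedDigits_eq _ hx0] at hsort
      rw [← hsort]
      exact PySem.List.sorted_perm (pvDigits0 t) (fun x : Int => x) false
    calc pvPSum (pvL t) (pvNatDigits t)
        = pvPSum d.toNat (pvNatDigits t) := by rw [← hdL]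
      _ = pvPSum d.toNat (pvDigits0 t) :=
          (pvPSum_digits0 t d.toNat (by rw [hdL]; exact pvL_pos t)).symm
      _ = pvPSum d.toNat combo := (pvPSum_perm d.toNat hperm).symm
      _ = t := ht.symm
  · rintro ⟨hx0, hlt, hnarc⟩
    refine ⟨(pvL x : Int), ?_, ?_⟩
    · rw [PySem.List.mem_pyRange_one]
      have h1 := pvL_pos x
      have h2 : pvL x ≤ pvL (limit - 1) := pvL_mono x (limit - 1) hx0 (by omega)
      rw [pvStrLen (limit - 1) (by omega)]
      omega
    · rw [List.mem_map]
      have hpx : pvPSum (pvL x : Int).toNat (pvSortedDigits x) = x := by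
        rw [pvSortedDigits_eq _ hx0, Int.toNat_natCast,
          pvPSum_perm (pvL x) (PySem.List.sorted_perm (pvDigits0 x) (fun x : Int => x) false),
          pvPSum_digits0 _ (pvL x) (pvL_pos x)]
        exact hnarc
      refine ⟨pvSortedDigits x, ?_, hpx⟩
      rw [List.mem_filter, decide_eq_true_iff]
      refine ⟨?_, ?_⟩
      · rw [pvNd_mem]
        rw [pvSortedDigits_eq _ hx0]
        refine ⟨?_, ?_, ?_⟩
        · rw [PySem.List.length_sorted, pvDigits0_length x hx0, Int.toNat_natCast]
        · intro c hc
          rw [PySem.List.mem_sorted] at hc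
          exact pvDigits0_mem x hx0 c hc
        · exact (PySem.List.sorted_pairwise (pvDigits0 x) (fun x => x)).imp (fun h => h)
      · rw [hpx]
        exact ⟨hlt, rfl, pvStrLen x hx0⟩

theorem pvBRes_nodup (limit : Int) : (pvBRes limit).Nodup := by
  unfold pvBRes
  rw [List.nodup_flatMap]
  constructor
  · intro d _
    refine List.Nodup.map_on ?_ ((pvNd_nodup d 0).filter _)
    intro y1 h1 y2 h2 heq
    rw [List.mem_filter, decide_eq_true_iff] at h1 h2
    have e1 := h1.2.2.1
    have e2 := h2.2.2.1
    rw [heq] at e1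
    rw [e1] at e2
    exact e2
  · refine (PySem.List.pairwise_lt_pyRange_one 1 _).imp ?_
    intro a b hab x hxa hxb
    rw [List.mem_map] at hxa hxb
    obtain ⟨c1, hc1, he1⟩ := hxa
    obtain ⟨c2, hc2, he2⟩ := hxb
    rw [List.mem_filter, decide_eq_true_iff] at hc1 hc2
    have l1 := hc1.2.2.2
    have l2 := hc2.2.2.2
    rw [he1] at l1
    rw [he2] at l2
    omega

-- ===== VERDICT (by name: the statement is the Claim_ definition above) =====
theorem find_narcissistic_numbers_spec : Claim_equal_find_narcissistic_numbers := by
  intro limit _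
  unfold Spec_find_narcissistic_numbers
  rw [pvA_filter]
  by_cases hl : limit ≤ 0
  · unfold find_narcissistic_numbers_alt
    rw [if_pos hl, PySem.List.pyRange_one_eq_nil hl, List.filter_nil]
  · rw [pvB_eq limit hl]
    refine (PySem.List.sorted_eq_of_perm_of_pairwise_lt (pvBRes limit)
      ((PySem.List.pyRange 0 limit 1).filter pvNarc) (fun x => x) ?_ ?_).symm
    · rw [List.perm_ext_iff_of_nodup
        (((PySem.List.pairwise_lt_pyRange_one 0 limit).filter pvNarc).imp
          (fun h => ne_of_lt h)) (pvBRes_nodup limit)]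
      intro a
      rw [List.mem_filter, PySem.List.mem_pyRange_one, pvBRes_mem limit a hl]
      unfold pvNarc
      rw [decide_eq_true_iff]
      tauto
    · exact (PySem.List.pairwise_lt_pyRange_one 0 limit).filter pvNarc
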